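-- pv_equiv track=rewrite | github.com/fmandl/micrOSPackages | _tools/ut_executor.py | _pytest_summary
-- ===== SOURCE A (Python) =====
-- def _pytest_summary(output):
--     lines = [line.strip() for line in output.splitlines() if line.strip()]
--     if not lines:
--         return "no pytest summary available"
--     summary = lines[-1]
--     if summary.startswith("=") and summary.endswith("="):
--         summary = summary.strip("= ").strip()
--     return summary
-- ===== SOURCE B (Python) =====
-- def _pytest_summary(output):
--     for line in reversed(output.splitlines()):
--         summary = line.strip()
--         if summary:
--             if summary.startswith("=") and summary.endswith("="):
--                 summary = summary.strip("= ").strip()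
--             return summary
--     return "no pytest summary available"
-- ===== Notes on version B (the rewrite author's own statement) =====
-- stated objective: simpler
-- what changed: Single reverse scan with early exit over splitlines instead of building the full list of stripped non-empty lines and indexing its last element.
import Mathlib
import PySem

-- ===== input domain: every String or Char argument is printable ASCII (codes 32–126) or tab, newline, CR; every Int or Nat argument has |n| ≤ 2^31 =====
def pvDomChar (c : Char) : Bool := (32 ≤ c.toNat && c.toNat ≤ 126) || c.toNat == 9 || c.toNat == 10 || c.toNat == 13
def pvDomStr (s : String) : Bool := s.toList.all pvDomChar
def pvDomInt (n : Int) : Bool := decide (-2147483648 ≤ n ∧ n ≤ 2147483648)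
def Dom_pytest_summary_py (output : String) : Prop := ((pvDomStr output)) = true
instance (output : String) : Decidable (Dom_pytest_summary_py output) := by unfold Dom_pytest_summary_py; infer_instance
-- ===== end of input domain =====

-- B replaces "build the full list of stripped non-empty lines, then take its last"
-- by a single reverse scan with early exit (objective: simpler).

-- ===== PORT A =====
-- the comprehension [line.strip() for line in output.splitlines() if line.strip()]
def pvLinesA (output : String) : List String :=
  (PySem.Str.splitlines output).filterMap
    (fun line => if PySem.Str.strip line ≠ "" then some (PySem.Str.strip line) else none)

def pytest_summary_py (output : String) : String :=
  let lines := pvLinesA output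
  match lines.getLast? with          -- 'if not lines: return …' together with 'lines[-1]'
  | none => "no pytest summary available"
  | some summary =>
    if PySem.Str.startswith summary "=" && PySem.Str.endswith summary "=" then
      PySem.Str.strip (PySem.Str.stripChars summary "= ")
    else summary

-- ===== PORT B =====
-- the 'for line in reversed(output.splitlines())' loop with early return
def pvGoB : List String → String
  | [] => "no pytest summary available"
  | line :: rest =>
    let summary := PySem.Str.strip line
    if summary ≠ "" then
      if PySem.Str.startswith summary "=" && PySem.Str.endswith summary "=" then
        PySem.Str.strip (PySem.Str.stripChars summary "= ")
      else summary
    else pvGoB rest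

def pytest_summary_py_alt (output : String) : String :=
  pvGoB (PySem.Str.splitlines output).reverse

-- ===== PRECONDITION & SPEC =====
def Spec_pytest_summary_py (output : String) (out : String) : Prop := out = pytest_summary_py_alt output
instance (output : String) (out : String) : Decidable (Spec_pytest_summary_py output out) := by unfold Spec_pytest_summary_py; infer_instance

-- ===== CLAIM (what is proved, stated in full; the proofs are below) =====
def Claim_equal_pytest_summary_py : Prop := ∀ (output : String), Dom_pytest_summary_py output → Spec_pytest_summary_py output (pytest_summary_py output)

-- ===== LEMMAS AND PROOFS =====
-- B's loop over a list computes the cleanup of the FIRST non-empty stripped line,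
-- i.e. the head of the filtered-stripped list.
theorem pvGoB_eq_head (ls : List String) :
    pvGoB ls =
      match (ls.filterMap
        (fun line => if PySem.Str.strip line ≠ "" then some (PySem.Str.strip line) else none)).head? with
      | none => "no pytest summary available"
      | some summary =>
        if PySem.Str.startswith summary "=" && PySem.Str.endswith summary "=" then
          PySem.Str.strip (PySem.Str.stripChars summary "= ")
        else summary := by
  induction ls with
  | nil => rfl
  | cons line rest ih =>
    simp only [pvGoB, List.filterMap_cons]
    by_cases h : PySem.Str.strip line ≠ ""
    · simp [h]
    · simp [h, ih]

theorem pytest_summary_py_spec : Claim_equal_pytest_summary_py := by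
  intro output _
  show pytest_summary_py output = pytest_summary_py_alt output
  rw [pytest_summary_py, pytest_summary_py_alt, pvGoB_eq_head, List.filterMap_reverse,
    List.head?_reverse, pvLinesA]
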